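-- pv_equiv track=rewrite | github.com/waggle-sensor/waggle | coresensors/v3/testing/Adv_CaliPlot/CaliPlot/pre_calc.py | _get_file_name
-- ===== SOURCE A (Python) =====
-- def _get_file_name(input):
-- 	if "/" in input:
-- 		op = ""
--
-- 		name = input.split("/")
-- 		for j in range(len(name) - 1):
-- 			op = op + name[j] + "/"
--
-- 		new_file = op + "_" + name[-1]
-- 	else:
-- 		new_file = "_" + input
--
-- 	return new_file
-- ===== SOURCE B (Python) =====
-- def _get_file_name(input):
-- 	idx = input.rfind("/")
-- 	return input[:idx + 1] + "_" + input[idx + 1:]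
-- ===== Notes on version B (the rewrite author's own statement) =====
-- stated objective: simpler
-- what changed: Instead of splitting the path on the separator and rebuilding all leading components in a loop, B locates the last separator once with rfind and inserts the underscore by two slices; rfind returning -1 on separator-free input makes the explicit if/else disappear.
import Mathlib
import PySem

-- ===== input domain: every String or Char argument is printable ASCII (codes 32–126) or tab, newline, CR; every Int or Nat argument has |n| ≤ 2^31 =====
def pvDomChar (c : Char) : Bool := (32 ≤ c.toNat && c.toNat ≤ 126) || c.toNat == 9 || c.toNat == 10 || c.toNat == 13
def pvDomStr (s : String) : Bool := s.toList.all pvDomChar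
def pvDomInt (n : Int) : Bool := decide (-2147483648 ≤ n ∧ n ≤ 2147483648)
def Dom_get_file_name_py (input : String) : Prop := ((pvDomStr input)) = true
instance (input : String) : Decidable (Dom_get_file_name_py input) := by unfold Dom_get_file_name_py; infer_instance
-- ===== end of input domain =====

-- B replaces A's split-on-'/'-then-rebuild loop by one rfind of the last '/' and two slices (simpler decomposition; same cost).

-- ===== PORT A =====
-- literal transliteration of A: split on "/", rebuild every leading component followed by "/" in a loop, prepend "_" to the last.
def get_file_name_py (input : String) : String :=
  if PySem.Str.isIn "/" input = true then
    let op : List Char := []                                    -- op = ""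
    let name := PySem.Chars.splitOn input.toList ['/']          -- input.split("/")
    let op := (PySem.List.pyRange 0 ((name.length : Int) - 1) 1).foldl
        (fun op j => op ++ PySem.List.pyGetD name j [] ++ ['/']) op   -- op = op + name[j] + "/"
    String.ofList (op ++ '_' :: PySem.List.pyGetD name (-1) []) -- new_file = op + "_" + name[-1]
  else
    "_" ++ input

-- ===== PORT B =====
def get_file_name_py_alt (input : String) : String :=
  let idx := PySem.Str.rfind input "/"
  PySem.Str.slice input none (some (idx + 1)) ++ "_" ++ PySem.Str.slice input (some (idx + 1)) none

-- ===== PRECONDITION & SPEC =====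
def Spec_get_file_name_py (input : String) (out : String) : Prop := out = get_file_name_py_alt input
instance (input : String) (out : String) : Decidable (Spec_get_file_name_py input out) := by unfold Spec_get_file_name_py; infer_instance

-- ===== CLAIM (what is proved, stated in full; the proofs are below) =====
def Claim_equal_get_file_name_py : Prop := ∀ (input : String), Dom_get_file_name_py input → Spec_get_file_name_py input (get_file_name_py input)

-- ===== LEMMAS AND PROOFS =====

-- a structural twin of PySem.Chars.splitOn.go for sep = ['/']
def pvParts (cur : List Char) : List Char → List (List Char)
  | [] => [cur.reverse]
  | c :: rest => if c = '/' then cur.reverse :: pvParts [] rest else pvParts (c :: cur) rest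

theorem pvGo_eq_parts (l : List Char) : ∀ (fuel : Nat) (cur : List Char) (acc : List (List Char)),
    l.length < fuel →
    PySem.Chars.splitOn.go ['/'] fuel l cur acc = acc.reverse ++ pvParts cur l := by
  induction l with
  | nil =>
      intro fuel cur acc h
      match fuel with
      | fuel + 1 => simp [PySem.Chars.splitOn.go, pvParts]
  | cons c rest ih =>
      intro fuel cur acc h
      match fuel with
      | fuel + 1 =>
        simp only [PySem.Chars.splitOn.go]
        by_cases hc : c = '/'
        · subst hc
          simp only [List.isPrefixOf, beq_self_eq_true, Bool.true_and, if_pos, pvParts,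
            List.length_cons, List.length_nil, List.drop_succ_cons, List.drop_zero]
          rw [ih fuel [] (cur.reverse :: acc) (by simpa using Nat.lt_of_succ_lt_succ h)]
          simp
        · have hne : ('/' == c) = false := beq_eq_false_iff_ne.mpr (fun h' => hc h'.symm)
          rw [if_neg (show ¬(['/'].isPrefixOf (c :: rest) = true) by simp [List.isPrefixOf, hne])]
          rw [ih fuel (c :: cur) acc (by simpa using Nat.lt_of_succ_lt_succ h)]
          simp only [pvParts, if_neg hc]

theorem pvSplitOn_eq (cs : List Char) : PySem.Chars.splitOn cs ['/'] = pvParts [] cs := by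
  unfold PySem.Chars.splitOn
  rw [pvGo_eq_parts cs (cs.length + 1) [] [] (Nat.lt_succ_self _)]
  simp

theorem pvParts_modifyHead (l : List Char) : ∀ cur, pvParts cur l = (pvParts [] l).modifyHead (cur.reverse ++ ·) := by
  induction l with
  | nil => intro cur; simp [pvParts]
  | cons c rest ih =>
      intro cur
      by_cases hc : c = '/'
      · subst hc; simp [pvParts]
      · simp only [pvParts, hc, if_neg, ih [c], ih (c :: cur)]
        cases pvParts [] rest with
        | nil => simp
        | cons h t => simp

theorem pvParts_ne_nil (l : List Char) : ∀ cur, pvParts cur l ≠ [] := by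
  induction l with
  | nil => intro cur; simp [pvParts]
  | cons c rest ih =>
      intro cur
      by_cases hc : c = '/'
      · subst hc; simp [pvParts]
      · simp only [pvParts, hc, if_neg]; exact ih _

theorem pvParts_len2 (l : List Char) (h : '/' ∈ l) : 2 ≤ (pvParts [] l).length := by
  induction l with
  | nil => simp at h
  | cons c rest ih =>
      by_cases hc : c = '/'
      · subst hc
        have h1 : pvParts [] rest ≠ [] := pvParts_ne_nil rest []
        have h2 : 1 ≤ (pvParts [] rest).length := by
          cases hne : pvParts [] rest with
          | nil => exact absurd hne h1
          | cons a t => simp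
        show 2 ≤ (pvParts [] ('/' :: rest)).length
        simp only [pvParts, if_pos trivial, List.length_cons]
        omega
      · have hm : '/' ∈ rest := by
          cases List.mem_cons.mp h with
          | inl h' => exact absurd h'.symm hc
          | inr h' => exact h'
        show 2 ≤ (pvParts [] (c :: rest)).length
        simp only [pvParts, if_neg hc]
        rw [pvParts_modifyHead rest [c], List.length_modifyHead]
        exact ih hm

-- rfind with a single-character needle, unfolded structurally
theorem pvRfindGo_cons (c : Char) (cs : List Char) : ∀ (j : Nat),
    PySem.Chars.rfind.go (c :: cs) ['/'] (j + 1)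
      = if PySem.Chars.rfind.go cs ['/'] j = -1 then (if c = '/' then (0 : Int) else -1)
        else PySem.Chars.rfind.go cs ['/'] j + 1 := by
  intro j
  induction j with
  | zero =>
      simp only [PySem.Chars.rfind.go, List.drop_succ_cons, List.drop_zero]
      by_cases h : ['/'].isPrefixOf cs = true
      · simp [h]
      · simp only [Bool.not_eq_true] at h
        simp [h]
        by_cases hc : c = '/'
        · subst hc; simp [List.isPrefixOf]
        · have hne : ('/' == c) = false := beq_eq_false_iff_ne.mpr (fun h' => hc h'.symm)
          simp [hne, hc]
          exact fun h' => hc h'.symm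
  | succ j ih =>
      have hL : PySem.Chars.rfind.go (c :: cs) ['/'] (j + 1 + 1)
          = if ['/'].isPrefixOf (List.drop (j + 1 + 1) (c :: cs)) = true then ((j : Int) + 1 + 1)
            else PySem.Chars.rfind.go (c :: cs) ['/'] (j + 1) := by
        simp only [PySem.Chars.rfind.go]
        norm_num
      have hR : PySem.Chars.rfind.go cs ['/'] (j + 1)
          = if ['/'].isPrefixOf (List.drop (j + 1) cs) = true then ((j : Int) + 1)
            else PySem.Chars.rfind.go cs ['/'] j := by
        simp only [PySem.Chars.rfind.go]
        norm_num
      rw [hL, hR, List.drop_succ_cons]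
      by_cases h : ['/'].isPrefixOf (List.drop (j + 1) cs) = true
      · have hne : ((j : Int) + 1) ≠ -1 := by omega
        simp [h, hne]
      · simp only [Bool.not_eq_true] at h
        simp [h, ih]

theorem pvRfindGo_ge (s sub : List Char) : ∀ (j : Nat), -1 ≤ PySem.Chars.rfind.go s sub j := by
  intro j
  induction j with
  | zero =>
      simp only [PySem.Chars.rfind.go]
      split <;> omega
  | succ j ih =>
      have : PySem.Chars.rfind.go s sub (j + 1)
          = if sub.isPrefixOf (List.drop (j + 1) s) = true then ((j : Int) + 1)
            else PySem.Chars.rfind.go s sub j := by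
        simp only [PySem.Chars.rfind.go]; norm_num
      rw [this]
      split
      · omega
      · exact ih

theorem pvRfind_ge (cs : List Char) : -1 ≤ PySem.Chars.rfind cs ['/'] :=
  pvRfindGo_ge cs ['/'] cs.length

theorem pvRfind_cons (c : Char) (cs : List Char) :
    PySem.Chars.rfind (c :: cs) ['/']
      = if PySem.Chars.rfind cs ['/'] = -1 then (if c = '/' then (0 : Int) else -1)
        else PySem.Chars.rfind cs ['/'] + 1 := by
  unfold PySem.Chars.rfind
  simpa using pvRfindGo_cons c cs cs.length

theorem pvRfind_nil : PySem.Chars.rfind [] ['/'] = -1 := by decide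

theorem pvRfind_neg_iff (cs : List Char) : PySem.Chars.rfind cs ['/'] = -1 ↔ '/' ∉ cs := by
  induction cs with
  | nil => simp [pvRfind_nil]
  | cons c rest ih =>
      rw [pvRfind_cons]
      by_cases h : PySem.Chars.rfind rest ['/'] = -1
      · have hm : '/' ∉ rest := ih.mp h
        by_cases hc : c = '/'
        · subst hc; simp [h, hm]
        · simp [h, hc, hm, Ne.symm hc]
      · have hm : '/' ∈ rest := by
          by_contra hn; exact h (ih.mpr hn)
        simp only [if_neg h]
        constructor
        · intro he
          have := pvRfind_ge rest
          omega
        · intro hn; exact absurd (List.mem_cons_of_mem c hm) hn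

theorem pvParts_no_slash (l : List Char) (h : '/' ∉ l) : ∀ cur, pvParts cur l = [cur.reverse ++ l] := by
  induction l with
  | nil => intro cur; simp [pvParts]
  | cons c rest ih =>
      intro cur
      have hc : ¬ c = '/' := fun hh => h (hh ▸ List.mem_cons_self)
      have hr : '/' ∉ rest := fun hh => h (List.mem_cons_of_mem c hh)
      simp only [pvParts, if_neg hc, ih hr (c :: cur)]
      simp

-- main chars-level lemma: A's split-and-rejoin equals B's take/drop at the last '/'
theorem pvMain (cs : List Char) (h : '/' ∈ cs) :
    (pvParts [] cs).dropLast.flatMap (· ++ ['/']) ++ '_' :: (pvParts [] cs).getLastD []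
      = cs.take (PySem.Chars.rfind cs ['/'] + 1).toNat ++ '_' :: cs.drop (PySem.Chars.rfind cs ['/'] + 1).toNat := by
  induction cs with
  | nil => simp at h
  | cons c rest ih =>
      by_cases hm : '/' ∈ rest
      · have hk : PySem.Chars.rfind rest ['/'] ≠ -1 := fun he => (pvRfind_neg_iff rest).mp he hm
        have hk0 : 0 ≤ PySem.Chars.rfind rest ['/'] := by have := pvRfind_ge rest; omega
        rw [pvRfind_cons, if_neg hk]
        have ht : (PySem.Chars.rfind rest ['/'] + 1 + 1).toNat
            = (PySem.Chars.rfind rest ['/'] + 1).toNat + 1 := by omega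
        rw [ht, List.take_succ_cons, List.drop_succ_cons]
        by_cases hc : c = '/'
        · subst hc
          have hP : pvParts [] rest ≠ [] := pvParts_ne_nil rest []
          have hsplit : pvParts [] ('/' :: rest) = [] :: pvParts [] rest := by
            simp [pvParts]
          rw [hsplit, List.dropLast_cons_of_ne_nil hP, List.getLastD_cons]
          have hd : (pvParts [] rest).getLastD ([].reverse : List Char) = (pvParts [] rest).getLastD [] := by
            simp
          simp only [List.flatMap_cons, List.nil_append, List.cons_append, hd]
          exact congrArg _ (ih hm)
        · have h2 : 2 ≤ (pvParts [] rest).length := pvParts_len2 rest hm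
          have hsplit : pvParts [] (c :: rest) = pvParts [c] rest := by
            simp [pvParts, hc]
          rw [hsplit, pvParts_modifyHead rest [c]]
          obtain ⟨p0, p1, t, hPt⟩ : ∃ p0 p1 t, pvParts [] rest = p0 :: p1 :: t := by
            cases hP : pvParts [] rest with
            | nil => rw [hP] at h2; simp at h2
            | cons a u =>
              cases u with
              | nil => rw [hP] at h2; simp at h2
              | cons b v => exact ⟨a, b, v, rfl⟩
          rw [hPt] at ih ⊢
          simp only [List.modifyHead_cons, List.reverse_cons, List.reverse_nil, List.nil_append,
            List.dropLast_cons₂, List.flatMap_cons, List.getLastD_cons, List.singleton_append,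
            List.cons_append] at ih ⊢
          exact congrArg _ (ih hm)
      · have hc : c = '/' := by
          cases List.mem_cons.mp h with
          | inl h' => exact h'.symm
          | inr h' => exact absurd h' hm
        subst hc
        have hr : PySem.Chars.rfind rest ['/'] = -1 := (pvRfind_neg_iff rest).mpr hm
        rw [pvRfind_cons, if_pos hr, if_pos rfl]
        show (pvParts [] ('/' :: rest)).dropLast.flatMap (· ++ ['/']) ++ _ = _
        have : pvParts [] ('/' :: rest) = [[], rest] := by
          simp [pvParts, pvParts_no_slash rest hm]
        rw [this]
        simp

-- the rebuild loop of A computes the concatenation of all leading components, each followed by '/'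
theorem pvFold (name : List (List Char)) :
    (PySem.List.pyRange 0 ((name.length : Int) - 1) 1).foldl
        (fun op j => op ++ PySem.List.pyGetD name j [] ++ ['/']) []
      = name.dropLast.flatMap (· ++ ['/']) := by
  cases name with
  | nil => rw [PySem.List.pyRange_one_eq_nil (by norm_num)]; simp
  | cons a u =>
      have hlen : ((a :: u).length : Int) - 1 = (((a :: u).dropLast.length : Int)) := by
        simp [List.length_dropLast]
      rw [hlen]
      rw [PySem.List.foldl_congr_mem _ _
        (fun op j => op ++ (PySem.List.pyGetD (a :: u).dropLast j [] ++ ['/'])) _ ?_]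
      · rw [PySem.List.foldl_pyRange_zero_pyGetD' (a :: u).dropLast [] (fun op p => op ++ (p ++ ['/'])) []]
        rw [PySem.List.foldl_append_eq_flatMap]
        simp
      · intro acc j hj
        have hj' := PySem.List.mem_pyRange_one.mp hj
        have h0 : 0 ≤ j := hj'.1
        have h1 : j < ((a :: u).dropLast.length : Int) := hj'.2
        have h1' : j.toNat < (a :: u).dropLast.length := by omega
        have h2' : j.toNat < (a :: u).length := by
          have := List.length_dropLast (xs := (a :: u)); omega
        show acc ++ PySem.List.pyGetD (a :: u) j [] ++ ['/']
            = acc ++ (PySem.List.pyGetD (a :: u).dropLast j [] ++ ['/'])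
        rw [PySem.List.pyGetD_eq_getElem _ _ h0 (by omega),
            PySem.List.pyGetD_eq_getElem _ _ h0 (by omega),
            List.getElem_dropLast, List.append_assoc]

theorem pvSingletonInfix (a : Char) (l : List Char) : [a] <:+: l ↔ a ∈ l := by
  constructor
  · intro h; exact h.subset List.mem_cons_self
  · intro h
    obtain ⟨s, t, rfl⟩ := List.append_of_mem h
    exact ⟨s, t, by simp⟩

-- ===== VERDICT (by name: the statement is the Claim_ definition above) =====
theorem get_file_name_py_spec : Claim_equal_get_file_name_py := by
  intro input _
  unfold Spec_get_file_name_py get_file_name_py get_file_name_py_alt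
  have hk := pvRfind_ge input.toList
  by_cases hin : PySem.Str.isIn "/" input = true
  · have hmem : '/' ∈ input.toList := by
      have := (PySem.Str.isIn_iff_infix "/" input).mp hin
      simpa using (pvSingletonInfix '/' input.toList).mp (by simpa using this)
    have hne : PySem.Chars.rfind input.toList ['/'] ≠ -1 :=
      fun he => (pvRfind_neg_iff input.toList).mp he hmem
    have h0 : 0 ≤ PySem.Chars.rfind input.toList ['/'] + 1 := by omega
    rw [if_pos hin]
    apply String.ext
    have hrf : PySem.Str.rfind input "/" = PySem.Chars.rfind input.toList ['/'] := by
      simp [PySem.Str.rfind]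
    simp only [PySem.Str.slice, hrf, String.toList_append]
    rw [pvFold, pvSplitOn_eq]
    rw [PySem.List.pyGetD_neg_one _ _ (pvParts_ne_nil input.toList [])]
    have hgl : (pvParts [] input.toList).getLast (pvParts_ne_nil input.toList [])
        = (pvParts [] input.toList).getLastD [] := by
      rw [List.getLastD_eq_getLast?, List.getLast?_eq_some_getLast (pvParts_ne_nil input.toList [])]
      rfl
    simp only [String.toList_ofList, hgl]
    have := pvMain input.toList hmem
    rw [this]
    have hsl1 : PySem.Chars.slice input.toList none (some (PySem.Chars.rfind input.toList ['/'] + 1))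
        = input.toList.take (PySem.Chars.rfind input.toList ['/'] + 1).toNat := by
      simp only [PySem.Chars.slice_eq_listSlice]
      exact PySem.List.slice_to _ h0
    have hsl2 : PySem.Chars.slice input.toList (some (PySem.Chars.rfind input.toList ['/'] + 1)) none
        = input.toList.drop (PySem.Chars.rfind input.toList ['/'] + 1).toNat := by
      simp only [PySem.Chars.slice_eq_listSlice]
      exact PySem.List.slice_from _ h0
    rw [hsl1, hsl2]
    simp
  · have hmem : '/' ∉ input.toList := by
      intro hm
      exact hin ((PySem.Str.isIn_iff_infix "/" input).mpr
        (by simpa using (pvSingletonInfix '/' input.toList).mpr hm))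
    have hr : PySem.Chars.rfind input.toList ['/'] = -1 := (pvRfind_neg_iff input.toList).mpr hmem
    rw [if_neg hin]
    apply String.ext
    have hrf : PySem.Str.rfind input "/" = PySem.Chars.rfind input.toList ['/'] := by
      simp [PySem.Str.rfind]
    simp only [PySem.Str.slice, hrf, hr, String.toList_append]
    norm_num
    have hsl1 : PySem.List.slice input.toList none (some 0) = [] := by
      rw [PySem.List.slice_to _ (by norm_num : (0:Int) ≤ 0)]
      simp
    have hsl2 : PySem.List.slice input.toList (some 0) none = input.toList := by
      rw [PySem.List.slice_from _ (by norm_num : (0:Int) ≤ 0)]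
      simp
    rw [hsl1]
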